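-- pv_equiv track=rewrite | github.com/Trappie/college | CS61A Structure and Interpretation of Computer Programs/lab/hw04/hw04.py | count_change_rec
-- ===== SOURCE A (Python) =====
-- def find_biggest_ex(amount):
--     assert amount >= 0
--     ex = 0
--     while 2 ** ex <= amount:
--         ex += 1
--     ex -= 1
--     return ex
--
-- def count_change_rec(amount, ex):
--     """AMOUNT is the amount of money to get changed
--     EX is the highest exponent of 2 to be used in the process"""
--     if amount == 0: # base case: the amount is 0
--         return 1
--     if 2 ** ex > amount:# if the exponent is not proper
--         return count_change_rec(amount, find_biggest_ex(amount))
--     if ex == 0: # base case: if the component is all 1, then there is only one way to do di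
--         return 1
--     else:
--         without_ex = count_change_rec(amount, ex - 1)
--         with_ex = 0
--         tmp = 2 ** ex
--         i = 1
--         while i * tmp <= amount:
--             with_ex += count_change_rec(amount - i * tmp, ex - 1)
--             i += 1
--         return without_ex + with_ex
-- ===== SOURCE B (Python) =====
-- def count_change_rec(amount, ex):
--     """AMOUNT is the amount of money to get changed
--     EX is the highest exponent of 2 to be used in the process"""
--     if amount == 0:
--         return 1
--     e = min(ex, amount.bit_length() - 1)  # A normalizes an over-large exponent
--     dp = [1] * (amount + 1)               # ways using only coin 2**0
--     for k in range(1, e + 1):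
--         c = 2 ** k
--         for j in range(c, amount + 1):
--             dp[j] += dp[j - c]
--     return dp[amount]
-- ===== Notes on version B (the rewrite author's own statement) =====
-- stated objective: faster
-- what changed: Replaced A's exponential tree recursion (with an inner while loop over multiples of 2**ex and exponent re-normalisation) by a bottom-up coin-change dynamic-programming table over amounts 0..amount, one pass per power of 2.
import Mathlib
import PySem

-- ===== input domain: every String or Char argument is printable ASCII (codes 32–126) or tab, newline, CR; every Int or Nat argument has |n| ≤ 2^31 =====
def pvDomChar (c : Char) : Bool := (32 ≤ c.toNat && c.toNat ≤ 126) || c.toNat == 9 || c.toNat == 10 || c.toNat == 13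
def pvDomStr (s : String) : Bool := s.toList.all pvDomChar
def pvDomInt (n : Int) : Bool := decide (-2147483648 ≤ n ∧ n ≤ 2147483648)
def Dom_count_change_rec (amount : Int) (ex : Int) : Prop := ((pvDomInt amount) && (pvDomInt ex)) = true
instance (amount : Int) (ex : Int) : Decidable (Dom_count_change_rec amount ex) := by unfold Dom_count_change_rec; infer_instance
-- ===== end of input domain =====

-- B replaces A's exponential recursion by a bottom-up coin-change DP table (one pass per power of 2);
-- equivalence is proved via the common mathematical recurrence pvW.

-- ===== PORT A =====
-- 'ex = 0; while 2 ** ex <= amount: ex += 1' of find_biggest_ex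
def pvFbLoop (amount : Int) (ex : Nat) : Nat :=
  if 2 ^ ex ≤ amount then pvFbLoop amount (ex + 1) else ex
termination_by (amount + 1 - 2 ^ ex).toNat
decreasing_by
  have h1 : (0 : Int) < 2 ^ ex := pow_pos (by norm_num) ex
  have h2 : (2 : Int) ^ (ex + 1) = 2 ^ ex * 2 := pow_succ 2 ex
  omega

-- facts about the loop, cited by the termination proof of the port below
theorem pvFbLoop_spec (amount : Int) : ∀ (ex : Nat), 2 ^ ex ≤ amount →
    2 ^ (pvFbLoop amount ex - 1) ≤ amount ∧ amount < 2 ^ pvFbLoop amount ex ∧ ex < pvFbLoop amount ex := by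
  intro ex h
  fun_induction pvFbLoop amount ex with
  | case1 ex hle ih =>
    by_cases h2 : 2 ^ (ex + 1) ≤ amount
    · obtain ⟨x, y, z⟩ := ih h2
      exact ⟨x, y, by omega⟩
    · rw [pvFbLoop, if_neg h2]
      exact ⟨by simpa using hle, by omega, by omega⟩
  | case2 ex hgt => omega

def find_biggest_ex (amount : Int) : Int :=
  -- assert amount >= 0 : inputs where the assert fires are excluded by Pre_count_change_rec
  (pvFbLoop amount 0 : Int) - 1

def count_change_rec (amount : Int) (ex : Int) : Int :=
  if amount = 0 then 1
  else if amount < 0 ∨ ex < 0 then 0   -- totality guard: Python raises (AssertionError) or hits RecursionError here; outside Pre_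
  else if 2 ^ ex.toNat > amount then count_change_rec amount (find_biggest_ex amount)
  else if ex = 0 then 1
  else
    let without_ex := count_change_rec amount (ex - 1)
    let tmp : Int := 2 ^ ex.toNat
    -- 'i = 1; while i * tmp <= amount: with_ex += …; i += 1'  ==  for i in range(1, amount // tmp + 1)
    let with_ex := ((PySem.List.pyRange 1 (PySem.Int.floordiv amount tmp + 1) 1).attach).foldl
        (fun acc i => acc + count_change_rec (amount - i.1 * tmp) (ex - 1)) 0
    without_ex + with_ex
termination_by (amount.toNat, ex.toNat)
decreasing_by
  · -- normalisation call: exponent shrinks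
    have h0 : (2:Int) ^ (0:Nat) ≤ amount := by simpa using (by omega : (1:Int) ≤ amount)
    have hs := pvFbLoop_spec amount 0 h0
    apply Prod.Lex.right
    have hlt : (2:Int) ^ (pvFbLoop amount 0 - 1) < 2 ^ ex.toNat := by omega
    have := pow_lt_pow_iff_right₀ (a := (2:Int)) (by norm_num) |>.mp hlt
    simp [find_biggest_ex]
    omega
  · -- without_ex call
    apply Prod.Lex.right; omega
  · -- loop body call: amount shrinks
    apply Prod.Lex.left
    rename_i i
    have hmem := i.2
    have h1 : 1 ≤ i.1 ∧ i.1 < PySem.Int.floordiv amount (2 ^ ex.toNat) + 1 :=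
      (PySem.List.mem_pyRange_one).mp hmem
    have hq : i.1 * 2 ^ ex.toNat ≤ amount := by
      have := (PySem.Int.le_floordiv_iff_mul_le (b := 2 ^ ex.toNat) (a := amount) (q := i.1)
        (by positivity)).mp (by omega)
      exact this
    have hp : (0:Int) < 2 ^ ex.toNat := pow_pos (by norm_num) _
    have : (1:Int) * 2 ^ ex.toNat ≤ i.1 * 2 ^ ex.toNat := by
      exact mul_le_mul_of_nonneg_right (by omega) (by positivity)
    omega

-- ===== PORT B =====
def count_change_rec_alt (amount : Int) (ex : Int) : Int :=
  if amount = 0 then 1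
  else
    -- 'amount.bit_length() - 1' hand-ported as Nat.log2 (exact for amount ≥ 1, where B returns)
    let e : Int := min ex (Nat.log2 amount.toNat : Int)
    let dp : List Int := List.replicate (amount + 1).toNat 1
    let dp := (PySem.List.pyRange 1 (e + 1) 1).foldl (fun dp k =>
        let c : Int := 2 ^ k.toNat
        (PySem.List.pyRange c (amount + 1) 1).foldl
          (fun dp j => PySem.List.pySetD dp j (PySem.List.pyGetD dp j 0 + PySem.List.pyGetD dp (j - c) 0)) dp) dp
    PySem.List.pyGetD dp amount 0

-- ===== PRECONDITION & SPEC =====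
-- Pre_ excludes exactly the inputs on which the Python A raises: amount < 0 (AssertionError in
-- find_biggest_ex) and amount > 0 with ex < 0 (unbounded recursion, RecursionError).
def Pre_count_change_rec (amount : Int) (ex : Int) : Prop := 0 ≤ amount ∧ (amount = 0 ∨ 0 ≤ ex)
instance (amount : Int) (ex : Int) : Decidable (Pre_count_change_rec amount ex) := by
  unfold Pre_count_change_rec; infer_instance
def pvWitness_count_change_rec : Int × Int := (6, 2)

def Spec_count_change_rec (amount : Int) (ex : Int) (out : Int) : Prop := out = count_change_rec_alt amount ex
instance (amount : Int) (ex : Int) (out : Int) : Decidable (Spec_count_change_rec amount ex out) := by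
  unfold Spec_count_change_rec; infer_instance

-- ===== CLAIM (what is proved, stated in full; the proofs are below) =====
def Claim_equal_count_change_rec : Prop := ∀ (amount : Int) (ex : Int), Dom_count_change_rec amount ex → Pre_count_change_rec amount ex → Spec_count_change_rec amount ex (count_change_rec amount ex)

-- ===== LEMMAS AND PROOFS =====

-- the common mathematical recurrence: number of multiset partitions of a into powers 2^0 … 2^e
def pvW (a : Nat) (e : Nat) : Int :=
  if _h : a = 0 then 1
  else match e with
  | 0 => 1
  | e' + 1 => pvW a e' + (if 2 ^ (e' + 1) ≤ a then pvW (a - 2 ^ (e' + 1)) (e' + 1) else 0)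
termination_by (a, e)
decreasing_by
  · apply Prod.Lex.right; omega
  · apply Prod.Lex.left
    have : 0 < 2 ^ (e' + 1) := Nat.two_pow_pos _
    omega

theorem pvW_zero (e : Nat) : pvW 0 e = 1 := by unfold pvW; simp

theorem pvW_e0 (a : Nat) : pvW a 0 = 1 := by unfold pvW; split <;> rfl

theorem pvW_succ (a e : Nat) (h : a ≠ 0) :
    pvW a (e + 1) = pvW a e + (if 2 ^ (e + 1) ≤ a then pvW (a - 2 ^ (e + 1)) (e + 1) else 0) := by
  conv_lhs => rw [pvW]
  simp [h]

theorem pvW_high (a e : Nat) (h : a < 2 ^ (e + 1)) : pvW a (e + 1) = pvW a e := by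
  by_cases ha : a = 0
  · subst ha; rw [pvW_zero, pvW_zero]
  · rw [pvW_succ a e ha, if_neg (by omega)]; ring

theorem pvW_cap (a c : Nat) (hc : a < 2 ^ (c + 1)) : ∀ e, c ≤ e → pvW a e = pvW a c := by
  intro e
  induction e with
  | zero =>
    intro h
    have hc0 : c = 0 := by omega
    subst hc0; rfl
  | succ e ih =>
    intro h
    rcases Nat.lt_or_ge c (e + 1) with h1 | h1
    · have : a < 2 ^ (e + 1) := lt_of_lt_of_le hc (Nat.pow_le_pow_right (by norm_num) (by omega))
      rw [pvW_high a e this]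
      exact ih (by omega)
    · have : c = e + 1 := by omega
      subst this; rfl

theorem pvW_norm (a e : Nat) : pvW a e = pvW a (min e (Nat.log2 a)) := by
  by_cases ha : a = 0
  · subst ha; rw [pvW_zero, pvW_zero]
  · rcases Nat.le_total e (Nat.log2 a) with h | h
    · rw [Nat.min_eq_left h]
    · rw [Nat.min_eq_right h]
      exact pvW_cap a (Nat.log2 a) (Nat.lt_log2_self) e h

theorem pvW_unroll (a e : Nat) :
    pvW a (e + 1) = ((List.range (a / 2 ^ (e + 1) + 1)).map (fun i => pvW (a - i * 2 ^ (e + 1)) e)).sum := by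
  induction a using Nat.strong_induction_on with
  | _ a ih =>
    have hcpos : 0 < 2 ^ (e + 1) := Nat.two_pow_pos _
    by_cases hlt : a < 2 ^ (e + 1)
    · rw [Nat.div_eq_of_lt hlt, pvW_high a e hlt]
      simp
    · rw [not_lt] at hlt
      have ha0 : a ≠ 0 := by omega
      rw [pvW_succ a e ha0, if_pos hlt, ih (a - 2 ^ (e + 1)) (by omega)]
      conv_rhs => rw [Nat.div_eq_sub_div hcpos hlt, List.range_succ_eq_map]
      simp only [List.map_cons, List.map_map, List.sum_cons, Nat.zero_mul, Nat.sub_zero]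
      congr 1
      congr 1
      apply List.map_congr_left
      intro i _
      simp only [Function.comp_apply, Nat.succ_eq_add_one, Nat.add_mul, Nat.one_mul]
      congr 1
      omega

-- characterisation of A's port
theorem pow2_unique {p q a : Nat} (h1 : 2 ^ p ≤ a) (h2 : a < 2 ^ (p + 1))
    (h3 : 2 ^ q ≤ a) (h4 : a < 2 ^ (q + 1)) : p = q := by
  rcases Nat.lt_trichotomy p q with h | h | h
  · have : 2 ^ (p + 1) ≤ 2 ^ q := Nat.pow_le_pow_right (by norm_num) (by omega)
    omega
  · exact h
  · have : 2 ^ (q + 1) ≤ 2 ^ p := Nat.pow_le_pow_right (by norm_num) (by omega)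
    omega

theorem log2_eq {a p : Nat} (ha : a ≠ 0) (h1 : 2 ^ p ≤ a) (h2 : a < 2 ^ (p + 1)) :
    Nat.log2 a = p :=
  pow2_unique (Nat.log2_self_le ha) Nat.lt_log2_self h1 h2

theorem le_log2 {a ex : Nat} (h : 2 ^ ex ≤ a) : ex ≤ Nat.log2 a := by
  have h2 := Nat.lt_log2_self (n := a)
  by_contra hc
  have : 2 ^ (Nat.log2 a + 1) ≤ 2 ^ ex := Nat.pow_le_pow_right (by norm_num) (by omega)
  omega

theorem foldl_attach_add {α : Type} (l : List α) (g : α → Int) (init : Int) :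
    l.attach.foldl (fun acc x => acc + g x.1) init = l.foldl (fun acc x => acc + g x) init :=
  List.foldl_attach (f := fun acc x => acc + g x) (b := init) (l := l)

theorem sum_bridge (a ex : Nat) (hex : 1 ≤ ex) :
    pvW a ex = pvW a (ex - 1) + ((PySem.List.pyRange 1 (((a / 2 ^ ex : Nat) : Int) + 1) 1).map
      (fun i => pvW ((a : Int) - i * (2 : Int) ^ ex).toNat (ex - 1))).sum := by
  obtain ⟨e', rfl⟩ : ∃ e', ex = e' + 1 := ⟨ex - 1, by omega⟩
  rw [pvW_unroll a e', List.range_succ_eq_map, PySem.List.pyRange_one]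
  simp only [List.map_cons, List.map_map, List.sum_cons, Nat.zero_mul, Nat.sub_zero,
    Nat.add_sub_cancel, add_sub_cancel_right, Int.toNat_natCast]
  congr 1
  congr 1
  apply List.map_congr_left
  intro k hk
  have hk' : k < a / 2 ^ (e' + 1) := List.mem_range.mp hk
  have hcpos : 0 < 2 ^ (e' + 1) := Nat.two_pow_pos _
  have hmul : (k + 1) * 2 ^ (e' + 1) ≤ a := (Nat.le_div_iff_mul_le hcpos).mp (by omega)
  simp only [Function.comp_apply, Nat.succ_eq_add_one]
  have hmc : ((1 + (k : Int)) * (2 : Int) ^ (e' + 1)) = (((k + 1) * 2 ^ (e' + 1) : Nat) : Int) := by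
    push_cast; ring
  have hcast : ((a : Int) - (1 + (k : Int)) * (2 : Int) ^ (e' + 1)) =
      (((a - (k + 1) * 2 ^ (e' + 1) : Nat)) : Int) := by
    rw [hmc]; omega
  rw [hcast, Int.toNat_natCast]

theorem A_eq_W : ∀ (a ex : Nat), count_change_rec (a : Int) (ex : Int) = pvW a (min ex (Nat.log2 a)) := by
  intro a
  induction a using Nat.strong_induction_on with
  | _ a iha =>
    intro ex
    induction ex using Nat.strong_induction_on with
    | _ ex ihe =>
      by_cases ha0 : a = 0
      · subst ha0
        rw [count_change_rec]
        simp [pvW_zero]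
      · have ha1 : (1 : Int) ≤ (a : Int) := by exact_mod_cast Nat.one_le_iff_ne_zero.mpr ha0
        have hc2 : ((2 : Int)) ^ ex = ((2 ^ ex : Nat) : Int) := by push_cast; ring
        rw [count_change_rec]
        simp only [Int.toNat_natCast]
        rw [if_neg (by exact_mod_cast ha0), if_neg (by omega)]
        by_cases himp : a < 2 ^ ex
        · -- improper exponent: A renormalises to the biggest fitting one
          rw [if_pos (by rw [hc2]; exact_mod_cast himp)]
          have h0 : (2 : Int) ^ (0 : Nat) ≤ (a : Int) := by simpa using ha1
          have hs := pvFbLoop_spec (a : Int) 0 h0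
          have hLpos : 0 < pvFbLoop (a : Int) 0 := hs.2.2
          set L := pvFbLoop (a : Int) 0 with hLdef
          have hFB : find_biggest_ex (a : Int) = ((L - 1 : Nat) : Int) := by
            unfold find_biggest_ex
            rw [← hLdef]
            omega
          have hle : 2 ^ (L - 1) ≤ a := by exact_mod_cast hs.1
          have hlt2 : a < 2 ^ L := by exact_mod_cast hs.2.1
          have hlog : Nat.log2 a = L - 1 := by
            refine log2_eq ha0 hle ?_
            have hL1 : L - 1 + 1 = L := by omega
            rw [hL1]; exact hlt2
          have hLex : L - 1 < ex := by
            by_contra hc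
            have : 2 ^ ex ≤ 2 ^ (L - 1) := Nat.pow_le_pow_right (by norm_num) (by omega)
            omega
          rw [hFB, ihe (L - 1) hLex, hlog]
          congr 1
          omega
        · -- proper exponent
          rw [not_lt] at himp
          rw [if_neg (by rw [hc2]; exact_mod_cast not_lt.mpr himp)]
          have hexlog : ex ≤ Nat.log2 a := le_log2 himp
          by_cases hex0 : ex = 0
          · subst hex0
            simp [pvW_e0]
          · rw [if_neg (by exact_mod_cast hex0)]
            have hmin : min ex (Nat.log2 a) = ex := Nat.min_eq_left hexlog
            have hex1 : ((ex : Int) - 1) = ((ex - 1 : Nat) : Int) := by omega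
            have hwo : count_change_rec (a : Int) ((ex : Int) - 1) = pvW a (ex - 1) := by
              rw [hex1, ihe (ex - 1) (by omega), Nat.min_eq_left (by omega : ex - 1 ≤ Nat.log2 a)]
            have hq : PySem.Int.floordiv (a : Int) ((2 : Int) ^ ex) = ((a / 2 ^ ex : Nat) : Int) := by
              rw [hc2]
              exact_mod_cast PySem.Int.floordiv_natCast a (2 ^ ex)
            rw [hwo, hq,
              foldl_attach_add _ (fun i => count_change_rec ((a : Int) - i * (2 : Int) ^ ex) ((ex : Int) - 1)),
              PySem.List.foldl_add]
            have hmapeq : (PySem.List.pyRange 1 (((a / 2 ^ ex : Nat) : Int) + 1) 1).map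
                (fun i => count_change_rec ((a : Int) - i * (2 : Int) ^ ex) ((ex : Int) - 1)) =
                (PySem.List.pyRange 1 (((a / 2 ^ ex : Nat) : Int) + 1) 1).map
                (fun i => pvW ((a : Int) - i * (2 : Int) ^ ex).toNat (ex - 1)) := by
              apply List.map_congr_left
              intro i hi
              have hmem := (PySem.List.mem_pyRange_one).mp hi
              obtain ⟨iN, rfl⟩ := Int.eq_ofNat_of_zero_le (by omega : (0 : Int) ≤ i)
              have hiN1 : 1 ≤ iN := by exact_mod_cast hmem.1
              have hiNq : iN ≤ a / 2 ^ ex := by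
                have := hmem.2
                omega
              have hcpos : 0 < 2 ^ ex := Nat.two_pow_pos _
              have hmul : iN * 2 ^ ex ≤ a := (Nat.le_div_iff_mul_le hcpos).mp hiNq
              have hmpos : 1 ≤ iN * 2 ^ ex := Nat.one_le_iff_ne_zero.mpr (by positivity)
              have hm : a - iN * 2 ^ ex < a := by omega
              have hmc2 : ((iN : Int) * (2 : Int) ^ ex) = ((iN * 2 ^ ex : Nat) : Int) := by
                push_cast; ring
              have hcast : ((a : Int) - (iN : Int) * (2 : Int) ^ ex) =
                  (((a - iN * 2 ^ ex : Nat)) : Int) := by rw [hmc2]; omega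
              rw [hcast, hex1, Int.toNat_natCast, iha (a - iN * 2 ^ ex) hm (ex - 1),
                ← pvW_norm]
            rw [hmapeq, hmin, sum_bridge a ex (by omega)]
            ring


-- characterisation of B's port (DP row invariant)
theorem inner_row (n k : Nat) (hk : 1 ≤ k) :
    ∀ (t : Nat) (j0 : Int), (2 : Int) ^ k ≤ j0 → ((n : Int) + 1 - j0).toNat = t →
    (PySem.List.pyRange j0 ((n : Int) + 1) 1).foldl
        (fun dp j => PySem.List.pySetD dp j
          (PySem.List.pyGetD dp j 0 + PySem.List.pyGetD dp (j - 2 ^ k) 0))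
        ((List.range (n + 1)).map (fun j : Nat => if (j : Int) < j0 then pvW j k else pvW j (k - 1)))
      = (List.range (n + 1)).map (fun j => pvW j k) := by
  intro t
  induction t with
  | zero =>
    intro j0 hj0 ht
    rw [PySem.List.pyRange_one_eq_nil (by omega), List.foldl_nil]
    apply List.map_congr_left
    intro j hj
    have hjn := List.mem_range.mp hj
    rw [if_pos (by omega)]
  | succ t ih =>
    intro j0 hj0 ht
    have hc2 : ((2 : Int) ^ k) = ((2 ^ k : Nat) : Int) := by push_cast; ring
    rw [hc2] at hj0
    have hcpos : 0 < 2 ^ k := Nat.two_pow_pos k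
    obtain ⟨jN, rfl⟩ := Int.eq_ofNat_of_zero_le (show (0 : Int) ≤ j0 by omega)
    have hjNc : 2 ^ k ≤ jN := by exact_mod_cast hj0
    have hjNn : jN < n + 1 := by omega
    rw [PySem.List.pyRange_one_cons (by exact_mod_cast hjNn)]
    simp only [List.foldl_cons]
    have hidx : ((jN : Int) - 2 ^ k) = ((jN - 2 ^ k : Nat) : Int) := by rw [hc2]; omega
    have hstep : PySem.List.pySetD ((List.range (n + 1)).map
          (fun j : Nat => if (j : Int) < (jN : Int) then pvW j k else pvW j (k - 1))) (jN : Int)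
          (PySem.List.pyGetD ((List.range (n + 1)).map
            (fun j : Nat => if (j : Int) < (jN : Int) then pvW j k else pvW j (k - 1))) (jN : Int) 0 +
           PySem.List.pyGetD ((List.range (n + 1)).map
            (fun j : Nat => if (j : Int) < (jN : Int) then pvW j k else pvW j (k - 1))) ((jN : Int) - 2 ^ k) 0) =
        (List.range (n + 1)).map
          (fun j : Nat => if (j : Int) < (jN : Int) + 1 then pvW j k else pvW j (k - 1)) := by
      rw [hidx]
      simp only [PySem.List.pyGetD_natCast, PySem.List.pySetD_natCast]
      rw [List.getD_eq_getElem _ _ (by simpa using hjNn),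
        List.getD_eq_getElem _ _ (by simp; omega)]
      simp only [List.getElem_map, List.getElem_range]
      rw [if_neg (by omega), if_pos (by omega)]
      apply List.ext_getElem
      · simp
      · intro i h1 h2
        simp only [List.length_set, List.length_map, List.length_range] at h1
        rw [List.getElem_set]
        simp only [List.getElem_map, List.getElem_range]
        by_cases hij : jN = i
        · rw [if_pos hij, if_pos (by omega)]
          have hi0 : i ≠ 0 := by omega
          have hkk : k - 1 + 1 = k := by omega
          have hs := pvW_succ i (k - 1) hi0
          rw [hkk] at hs
          rw [hs, if_pos (by omega)]
          subst hij
          rfl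
        · rw [if_neg hij]
          by_cases h : (i : Int) < (jN : Int)
          · rw [if_pos h, if_pos (by omega)]
          · rw [if_neg h, if_neg (by omega)]
    rw [hstep]
    have hnext : ((jN : Int) + 1) = (((jN + 1 : Nat)) : Int) := by push_cast; ring
    rw [hnext]
    exact ih ((jN + 1 : Nat) : Int) (by rw [hc2]; omega) (by omega)

theorem outer_loop (n : Nat) (E : Int) :
    ∀ (t : Nat) (k0 : Int), 1 ≤ k0 → k0 ≤ E + 1 → (E + 1 - k0).toNat = t →
    (PySem.List.pyRange k0 (E + 1) 1).foldl
        (fun dp k =>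
          (PySem.List.pyRange (2 ^ k.toNat) ((n : Int) + 1) 1).foldl
            (fun dp j => PySem.List.pySetD dp j
              (PySem.List.pyGetD dp j 0 + PySem.List.pyGetD dp (j - 2 ^ k.toNat) 0)) dp)
        ((List.range (n + 1)).map (fun j => pvW j (k0 - 1).toNat))
      = (List.range (n + 1)).map (fun j => pvW j E.toNat) := by
  intro t
  induction t with
  | zero =>
    intro k0 h1 h2 ht
    rw [PySem.List.pyRange_one_eq_nil (by omega), List.foldl_nil]
    have hk0 : k0 = E + 1 := by omega
    subst hk0
    norm_num
  | succ t ih =>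
    intro k0 h1 h2 ht
    have hk0E : k0 < E + 1 := by omega
    have hkN : 1 ≤ k0.toNat := by omega
    rw [PySem.List.pyRange_one_cons hk0E, List.foldl_cons]
    have hmix : (List.range (n + 1)).map (fun j => pvW j (k0 - 1).toNat) =
        (List.range (n + 1)).map
          (fun j : Nat => if (j : Int) < 2 ^ k0.toNat then pvW j k0.toNat else pvW j (k0.toNat - 1)) := by
      apply List.map_congr_left
      intro j hj
      have hkk : k0.toNat - 1 + 1 = k0.toNat := by omega
      have hnum : (k0 - 1).toNat = k0.toNat - 1 := by omega
      by_cases hlt : (j : Int) < 2 ^ k0.toNat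
      · rw [if_pos hlt, hnum]
        have hjlt : j < 2 ^ (k0.toNat - 1 + 1) := by
          rw [hkk]
          have hcc : ((2 : Int) ^ k0.toNat) = ((2 ^ k0.toNat : Nat) : Int) := by push_cast; ring
          rw [hcc] at hlt
          omega
        have := pvW_high j (k0.toNat - 1) hjlt
        rw [hkk] at this
        exact this.symm
      · rw [if_neg hlt, hnum]
    rw [hmix]
    have hin := inner_row n k0.toNat hkN ((n : Int) + 1 - 2 ^ k0.toNat).toNat (2 ^ k0.toNat)
      le_rfl rfl
    rw [hin]
    have hsh : (List.range (n + 1)).map (fun j => pvW j k0.toNat) =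
        (List.range (n + 1)).map (fun j => pvW j (k0 + 1 - 1).toNat) := by
      apply List.map_congr_left
      intro j _
      congr 1
      omega
    rw [hsh]
    exact ih (k0 + 1) (by omega) (by omega) (by omega)

theorem B_eq_W (a ex : Nat) (ha : a ≠ 0) :
    count_change_rec_alt (a : Int) (ex : Int) = pvW a (min ex (Nat.log2 a)) := by
  rw [count_change_rec_alt, if_neg (by exact_mod_cast ha)]
  simp only [Int.toNat_natCast]
  have hE0 : (0 : Int) ≤ min (ex : Int) (Nat.log2 a : Int) := by omega
  have hinit : List.replicate ((a : Int) + 1).toNat (1 : Int) =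
      (List.range (a + 1)).map (fun j => pvW j ((1 : Int) - 1).toNat) := by
    have h1 : ((a : Int) + 1).toNat = a + 1 := by omega
    rw [h1]
    have h2 : (fun j : Nat => pvW j ((1 : Int) - 1).toNat) = fun _ : Nat => (1 : Int) := by
      funext j
      norm_num [pvW_e0]
    rw [h2]
    simp [List.map_const']
  rw [hinit, outer_loop a (min (ex : Int) (Nat.log2 a : Int))
    ((min (ex : Int) (Nat.log2 a : Int) + 1 - 1).toNat) 1 (by norm_num) (by omega) rfl]
  rw [PySem.List.pyGetD_natCast]
  have hget : ((List.range (a + 1)).map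
      (fun j => pvW j (min (ex : Int) (Nat.log2 a : Int)).toNat)).getD a 0 =
      pvW a (min (ex : Int) (Nat.log2 a : Int)).toNat := by
    rw [List.getD_eq_getElem _ _ (by simp)]
    simp only [List.getElem_map, List.getElem_range]
  rw [hget]
  congr 1
  omega


-- ===== VERDICT (by name: the statement is the Claim_ definition above) =====
theorem count_change_rec_spec : Claim_equal_count_change_rec := by
  intro amount ex _hd ⟨ha, hcase⟩
  unfold Spec_count_change_rec
  rcases hcase with h0 | hex
  · subst h0
    rw [count_change_rec, count_change_rec_alt]; simp
  · obtain ⟨a, rfl⟩ := Int.eq_ofNat_of_zero_le ha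
    obtain ⟨e, rfl⟩ := Int.eq_ofNat_of_zero_le hex
    by_cases haz : a = 0
    · subst haz; rw [count_change_rec, count_change_rec_alt]; simp
    · rw [A_eq_W a e, B_eq_W a e haz]
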